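-- pv_equiv track=rewrite | github.com/ccagil24/lab02-prelab-ccagil24 | comp100_lab02/q2_test.py | expected_wave
-- ===== SOURCE A (Python) =====
-- def expected_wave(n, h):
--     """Helper to build the expected wave string for comparison, matching README examples."""
--     if h <= 0 or n <= 0:
--         return ""
--     one_cycle = []
--     # Ascend 1..n
--     for i in range(1, n + 1):
--         one_cycle.append("  " * (i - 1) + str(i))
--     # Descend n-1..2 (exclude 1 to avoid double '1' across cycles)
--     for i in range(n - 1, 1, -1):
--         one_cycle.append("  " * (i - 1) + str(i))
--
--     # Special case: n == 1 -> cycle is just ["1"]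
--     if not one_cycle:
--         one_cycle = ["1"]
--
--     # Repeat to length h
--     lines = []
--     idx = 0
--     while len(lines) < h:
--         lines.append(one_cycle[idx])
--         idx = (idx + 1) % len(one_cycle)
--     return "\n".join(lines)
-- ===== SOURCE B (Python) =====
-- def expected_wave(n, h):
--     if h <= 0 or n <= 0:
--         return ""
--     period = 2 * n - 2
--     lines = []
--     for j in range(h):
--         if period == 0:
--             v = 1
--         else:
--             p = j % period
--             v = p + 1 if p < n else 2 * n - 1 - p
--         lines.append("  " * (v - 1) + str(v))
--     return "\n".join(lines)
-- ===== Notes on version B (the rewrite author's own statement) =====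
-- stated objective: simpler
-- what changed: B drops the precomputed one_cycle list and the modular while loop over it: each of the h lines is computed directly by closed-form arithmetic on j % (2n-2) (n==1 handled as period 0).
import Mathlib
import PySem

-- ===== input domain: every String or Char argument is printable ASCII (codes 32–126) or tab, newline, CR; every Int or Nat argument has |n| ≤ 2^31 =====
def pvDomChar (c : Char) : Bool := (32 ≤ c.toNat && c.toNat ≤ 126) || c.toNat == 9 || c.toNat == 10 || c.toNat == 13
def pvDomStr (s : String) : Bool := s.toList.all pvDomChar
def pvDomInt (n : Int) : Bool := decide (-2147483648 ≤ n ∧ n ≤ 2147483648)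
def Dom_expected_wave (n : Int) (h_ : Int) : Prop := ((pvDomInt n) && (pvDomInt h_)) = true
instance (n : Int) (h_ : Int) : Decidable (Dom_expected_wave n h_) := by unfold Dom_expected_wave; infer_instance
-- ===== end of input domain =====

-- B replaces A's precomputed cycle list and modular while loop by per-line closed-form
-- arithmetic on j % (2n-2); objective: simpler (no speed claim).
-- Ports work on List Char and join with PySem.Chars.join (exact for "\n".join of these ASCII lines).

-- ===== PORT A =====
-- "  " * (i - 1) + str(i)
def pvLineA (i : Int) : List Char :=
  PySem.List.pyRepeat [' ', ' '] (i - 1) ++ PySem.Int.toChars i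

-- the 'while len(lines) < h: lines.append(one_cycle[idx]); idx = (idx+1) % len(one_cycle)' loop
-- (one_cycle[idx] is always in range in A, so pyGetD is exact here)
def pvBuild (cyc : List (List Char)) (h_ : Int) (lines : List (List Char)) (idx : Int) :
    List (List Char) :=
  if h : (lines.length : Int) < h_ then
    pvBuild cyc h_ (lines ++ [PySem.List.pyGetD cyc idx []])
      (PySem.Int.mod (idx + 1) (cyc.length : Int))
  else lines
termination_by (h_ - lines.length).toNat
decreasing_by simp only [List.length_append, List.length_cons, List.length_nil]; omega

def expected_wave (n : Int) (h_ : Int) : String :=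
  if h_ ≤ 0 ∨ n ≤ 0 then ""
  else
    let c1 := (PySem.List.pyRange 1 (n + 1) 1).foldl (fun acc i => acc ++ [pvLineA i]) []
    let c2 := (PySem.List.pyRange (n - 1) 1 (-1)).foldl (fun acc i => acc ++ [pvLineA i]) c1
    let oneCycle := if c2 = [] then [['1']] else c2
    String.ofList (PySem.Chars.join ['\n'] (pvBuild oneCycle h_ [] 0))

-- ===== PORT B =====
-- "  " * (v - 1) + str(v)
def pvLineB (v : Int) : List Char :=
  PySem.List.pyRepeat [' ', ' '] (v - 1) ++ PySem.Int.toChars v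

def expected_wave_alt (n : Int) (h_ : Int) : String :=
  if h_ ≤ 0 ∨ n ≤ 0 then ""
  else
    let period := 2 * n - 2
    let lines := (PySem.List.pyRange 0 h_ 1).foldl (fun acc j =>
      let v := if period = 0 then 1
        else
          let p := PySem.Int.mod j period
          if p < n then p + 1 else 2 * n - 1 - p
      acc ++ [pvLineB v]) []
    String.ofList (PySem.Chars.join ['\n'] lines)

-- ===== PRECONDITION & SPEC =====
def Spec_expected_wave (n : Int) (h_ : Int) (out : String) : Prop := out = expected_wave_alt n h_
instance (n : Int) (h_ : Int) (out : String) : Decidable (Spec_expected_wave n h_ out) := by unfold Spec_expected_wave; infer_instance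

-- ===== CLAIM (what is proved, stated in full; the proofs are below) =====
def Claim_equal_expected_wave : Prop := ∀ (n : Int) (h_ : Int), Dom_expected_wave n h_ → Spec_expected_wave n h_ (expected_wave n h_)

-- ===== LEMMAS AND PROOFS =====

lemma pvBuild_eq (cyc : List (List Char)) (hc : 0 < cyc.length) (h_ : Int) :
    ∀ (fuel : Nat) (lines : List (List Char)) (idx : Nat), idx < cyc.length →
      fuel = (h_ - lines.length).toNat →
      pvBuild cyc h_ lines (idx : Int) =
        lines ++ (List.range fuel).map (fun t => cyc.getD ((idx + t) % cyc.length) []) := by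
  intro fuel
  induction fuel with
  | zero =>
    intro lines idx hidx hf
    rw [pvBuild, dif_neg (by omega)]
    simp
  | succ m ih =>
    intro lines idx hidx hf
    rw [pvBuild, dif_pos (by omega)]
    have hmod : PySem.Int.mod ((idx : Int) + 1) (cyc.length : Int)
        = (((idx + 1) % cyc.length : Nat) : Int) := by
      have h1 : ((idx : Int) + 1) = ((idx + 1 : Nat) : Int) := by push_cast; ring
      rw [h1, PySem.Int.mod_natCast]
    rw [hmod, ih _ _ (Nat.mod_lt _ hc) (by simp; omega)]
    rw [List.range_succ_eq_map]
    simp only [List.map_cons, List.map_map, Nat.add_zero, List.append_assoc,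
      List.singleton_append]
    congr 1
    congr 1
    · rw [Nat.mod_eq_of_lt hidx, PySem.List.pyGetD_natCast]
    · apply List.map_congr_left
      intro t _
      simp only [Function.comp_apply, Nat.mod_add_mod]
      have h2 : idx + 1 + t = idx + t.succ := by omega
      rw [h2]

lemma pvCycle_spec (n : Int) (hn : 2 ≤ n) :
    ((PySem.List.pyRange (n - 1) 1 (-1)).foldl (fun acc i => acc ++ [pvLineA i])
      ((PySem.List.pyRange 1 (n + 1) 1).foldl (fun acc i => acc ++ [pvLineA i] ) [])) =
    (List.range (2 * n - 2).toNat).map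
      (fun k : Nat => pvLineA (if (k : Int) < n then (k : Int) + 1 else 2 * n - 1 - (k : Int))) := by
  rw [PySem.List.foldl_append_singleton_eq_map, PySem.List.foldl_append_singleton_eq_map]
  rw [PySem.List.pyRange_one, PySem.List.pyRange_neg_one]
  have h1 : (n + 1 - 1).toNat = n.toNat := by omega
  have h2 : (2 * n - 2).toNat = n.toNat + (n - 1 - 1).toNat := by omega
  rw [h1, h2, List.range_add]
  simp only [List.nil_append, List.map_map, List.map_append]
  congr 1
  · apply List.map_congr_left
    intro k hk
    simp only [List.mem_range] at hk
    simp only [Function.comp_apply]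
    rw [if_pos (by omega)]
    congr 1
    omega
  · apply List.map_congr_left
    intro k hk
    simp only [List.mem_range] at hk
    simp only [Function.comp_apply]
    rw [if_neg (by push_cast; omega)]
    congr 1
    push_cast
    omega

-- ===== VERDICT (by name: the statement is the Claim_ definition above) =====
lemma pvLineB_eq (v : Int) : pvLineB v = pvLineA v := rfl

lemma pvBuild0 (cyc : List (List Char)) (hc : 0 < cyc.length) (h_ : Int) :
    pvBuild cyc h_ [] 0 =
      (List.range h_.toNat).map (fun t => cyc.getD (t % cyc.length) []) := by
  have := pvBuild_eq cyc hc h_ h_.toNat [] 0 hc (by simp)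
  simpa using this

theorem expected_wave_spec : Claim_equal_expected_wave := by
  intro n h_ _
  unfold Spec_expected_wave expected_wave expected_wave_alt
  by_cases hg : h_ ≤ 0 ∨ n ≤ 0
  · rw [if_pos hg, if_pos hg]
  · rw [if_neg hg, if_neg hg]
    have hh : 0 < h_ := by omega
    have hn : 0 < n := by omega
    dsimp only
    congr 1
    congr 1
    by_cases hn1 : n = 1
    · subst hn1
      have hc2 : ((PySem.List.pyRange ((1:Int) - 1) 1 (-1)).foldl (fun acc i => acc ++ [pvLineA i])
          ((PySem.List.pyRange 1 ((1:Int) + 1) 1).foldl (fun acc i => acc ++ [pvLineA i]) []))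
          = [['1']] := by decide
      rw [hc2, if_neg (by decide)]
      rw [pvBuild0 _ (by decide) h_]
      rw [PySem.List.foldl_append_singleton_eq_map, PySem.List.pyRange_one, List.map_map]
      simp only [List.nil_append, sub_zero]
      apply List.map_congr_left
      intro t ht
      norm_num [Nat.mod_one]
      rfl
    · have hn2 : 2 ≤ n := by omega
      have hcyc := pvCycle_spec n hn2
      rw [hcyc]
      have hL : 0 < (2 * n - 2).toNat := by omega
      rw [if_neg (by simp; omega)]
      rw [pvBuild0 _ (by simpa using hL) h_]
      rw [PySem.List.foldl_append_singleton_eq_map, PySem.List.pyRange_one, List.map_map]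
      simp only [List.length_map, List.length_range, List.nil_append, sub_zero]
      apply List.map_congr_left
      intro t ht
      simp only [Function.comp_apply, zero_add]
      have hmlt : t % (2 * n - 2).toNat < (2 * n - 2).toNat := Nat.mod_lt _ hL
      rw [List.getD_eq_getElem?_getD, List.getElem?_map, List.getElem?_range hmlt]
      simp only [Option.map_some, Option.getD_some]
      have hmodc : PySem.Int.mod (t : Int) (2 * n - 2) = ((t % (2 * n - 2).toNat : Nat) : Int) := by
        rw [show (2 * n - 2 : Int) = (((2 * n - 2).toNat : Nat) : Int) by omega,
          PySem.Int.mod_natCast]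
        simp
      rw [if_neg (show ¬((2 * n - 2 : Int) = 0) by omega), hmodc, pvLineB_eq]
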